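-- pv_equiv track=rewrite | github.com/yyw-0410/PhishCheck | backend/app/services/providers/base.py | is_valid_public_ipv4
-- ===== SOURCE A (Python) =====
-- def is_valid_public_ipv4(ip: str) -> bool:
--     """Check if an IPv4 address is valid and public (not private/reserved)."""
--     try:
--         parts = ip.split('.')
--         if len(parts) != 4:
--             return False
--         octets = [int(p) for p in parts]
--         if not all(0 <= o <= 255 for o in octets):
--             return False
--         first, second = octets[0], octets[1]
--         # 0.x.x.x - Current network
--         if first == 0:
--             return False
--         # 10.x.x.x - Private
--         if first == 10:
--             return False
--         # 127.x.x.x - Loopback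
--         if first == 127:
--             return False
--         # 169.254.x.x - Link-local
--         if first == 169 and second == 254:
--             return False
--         # 172.16.x.x - 172.31.x.x - Private
--         if first == 172 and 16 <= second <= 31:
--             return False
--         # 192.168.x.x - Private
--         if first == 192 and second == 168:
--             return False
--         # 224.x.x.x - 255.x.x.x - Multicast/Reserved
--         if first >= 224:
--             return False
--         return True
--     except (ValueError, IndexError):
--         return False
-- ===== SOURCE B (Python) =====
-- _BLOCKED = [
--     (0x00000000, 0x01000000),  # 0.0.0.0/8 current network
--     (0x0A000000, 0x0B000000),  # 10.0.0.0/8 private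
--     (0x7F000000, 0x80000000),  # 127.0.0.0/8 loopback
--     (0xA9FE0000, 0xA9FF0000),  # 169.254.0.0/16 link-local
--     (0xAC100000, 0xAC200000),  # 172.16.0.0/12 private
--     (0xC0A80000, 0xC0A90000),  # 192.168.0.0/16 private
--     (0xE0000000, 0x100000000), # 224.0.0.0/3 multicast/reserved
-- ]
--
--
-- def is_valid_public_ipv4(ip: str) -> bool:
--     parts = ip.split('.')
--     if len(parts) != 4:
--         return False
--     try:
--         octets = [int(p) for p in parts]
--     except ValueError:
--         return False
--     n = 0
--     for o in octets:
--         if o < 0 or o > 255: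
--             return False
--         n = n * 256 + o
--     return not any(lo <= n < hi for lo, hi in _BLOCKED)
-- ===== Notes on version B (the rewrite author's own statement) =====
-- stated objective: alternative
-- what changed: A's chain of seven hard-coded first/second-octet comparisons is replaced by packing the four octets into one 32-bit integer during a single validating loop and scanning a data-driven table of blocked [lo,hi) address ranges (the CIDR blocks).
import Mathlib
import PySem

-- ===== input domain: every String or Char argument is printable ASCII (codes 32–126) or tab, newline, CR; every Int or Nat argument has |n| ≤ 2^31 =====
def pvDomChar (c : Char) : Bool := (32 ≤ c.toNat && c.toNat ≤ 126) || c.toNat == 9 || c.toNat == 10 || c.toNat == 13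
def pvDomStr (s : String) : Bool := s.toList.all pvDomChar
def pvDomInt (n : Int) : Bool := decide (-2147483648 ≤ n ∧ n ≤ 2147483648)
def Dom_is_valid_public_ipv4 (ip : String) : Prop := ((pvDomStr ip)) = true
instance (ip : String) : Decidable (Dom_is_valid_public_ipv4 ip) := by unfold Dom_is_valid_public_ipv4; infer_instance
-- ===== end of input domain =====

-- B replaces A's chain of special-case octet comparisons by one numeric range scan over a
-- blocked-CIDR table (alternative formulation, same cost).

-- ===== PORT A =====
-- literal transliteration of A: split, length check, per-part int(), bounds check, if-chain
def is_valid_public_ipv4 (ip : String) : Bool :=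
  let parts := (PySem.Str.split? ip ".").getD []  -- sep "." ≠ "" so split? is some
  if parts.length ≠ 4 then false
  else
    match parts.mapM PySem.Int.ofStr? with
    | none => false          -- int(p) raised ValueError, caught → False
    | some octets =>
      if ¬ (octets.all fun o => decide (0 ≤ o) && decide (o ≤ 255)) then false
      else
        match PySem.List.pyGet? octets 0, PySem.List.pyGet? octets 1 with
        | some first, some second =>
          if first = 0 then false
          else if first = 10 then false
          else if first = 127 then false
          else if first = 169 && second = 254 then false
          else if first = 172 && (16 ≤ second && second ≤ 31) then false
          else if first = 192 && second = 168 then false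
          else if first ≥ 224 then false
          else true
        | _, _ => false      -- IndexError, caught → False (unreachable: length = 4)

-- ===== PORT B =====
-- blocked ranges [lo, hi) as 32-bit integers (from Source B's _BLOCKED)
def pvBlocked : List (Int × Int) :=
  [(0, 16777216), (167772160, 184549376), (2130706432, 2147483648),
   (2851995648, 2852061184), (2886729728, 2887778304),
   (3232235520, 3232301056), (3758096384, 4294967296)]

-- the for-loop of Source B: bounds-check each octet while accumulating n, then scan pvBlocked
def pvAltLoop : List Int → Int → Bool
  | [], n => !(pvBlocked.any fun lh => decide (lh.1 ≤ n) && decide (n < lh.2))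
  | o :: rest, n => if o < 0 || o > 255 then false else pvAltLoop rest (n * 256 + o)

def is_valid_public_ipv4_alt (ip : String) : Bool :=
  let parts := (PySem.Str.split? ip ".").getD []  -- sep "." ≠ "" so split? is some
  if parts.length ≠ 4 then false
  else
    match parts.mapM PySem.Int.ofStr? with
    | none => false          -- int(p) raised ValueError, caught → False
    | some octets => pvAltLoop octets 0

-- ===== PRECONDITION & SPEC =====
def Spec_is_valid_public_ipv4 (ip : String) (out : Bool) : Prop := out = is_valid_public_ipv4_alt ip
instance (ip : String) (out : Bool) : Decidable (Spec_is_valid_public_ipv4 ip out) := by unfold Spec_is_valid_public_ipv4; infer_instance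

-- ===== CLAIM (what is proved, stated in full; the proofs are below) =====
def Claim_equal_is_valid_public_ipv4 : Prop := ∀ (ip : String), Dom_is_valid_public_ipv4 ip → Spec_is_valid_public_ipv4 ip (is_valid_public_ipv4 ip)

-- ===== LEMMAS AND PROOFS =====

-- length preservation of the octet parse
lemma pvLenMapM {α β : Type} (f : α → Option β) :
    ∀ (xs : List α) (ys : List β), xs.mapM f = some ys → ys.length = xs.length := by
  intro xs
  induction xs with
  | nil => intro ys h; simp_all
  | cons x xs ih =>
    intro ys h
    rw [List.mapM_cons] at h
    cases hf : f x with
    | none => simp [hf] at h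
    | some b =>
      simp only [hf, Option.bind_eq_bind, Option.bind_some] at h
      cases ht : xs.mapM f with
      | none => simp [ht] at h
      | some bs =>
        simp only [ht, Option.map_some] at h
        cases h
        simp [ih bs ht]

-- core arithmetic fact: for four octets, A's if-chain equals B's range scan
lemma pvCore (a b c d : Int) :
    (if ¬ (([a, b, c, d].all fun o => decide (0 ≤ o) && decide (o ≤ 255))) then false
     else
       if a = 0 then false
       else if a = 10 then false
       else if a = 127 then false
       else if a = 169 && b = 254 then false
       else if a = 172 && (16 ≤ b && b ≤ 31) then false
       else if a = 192 && b = 168 then false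
       else if a ≥ 224 then false
       else true) = pvAltLoop [a, b, c, d] 0 := by
  simp only [pvAltLoop, pvBlocked, List.all_cons, List.all_nil, List.any_cons, List.any_nil]
  rw [Bool.eq_iff_iff]
  simp only [Bool.and_eq_true, Bool.or_eq_true, decide_eq_true_eq,
    Bool.ite_eq_true_distrib, Bool.not_eq_eq_eq_not, Bool.not_true]
  constructor
  · intro h
    split_ifs at h <;> simp_all <;> omega
  · intro h
    split_ifs at h <;> simp_all <;> omega

theorem pv_main : ∀ (ip : String), is_valid_public_ipv4 ip = is_valid_public_ipv4_alt ip := by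
  intro ip
  unfold is_valid_public_ipv4 is_valid_public_ipv4_alt
  set parts := (PySem.Str.split? ip ".").getD []  -- sep "." ≠ "" so split? is some with hp
  by_cases hl : parts.length = 4
  · simp only [hl, ne_eq, not_true_eq_false, if_false]
    cases hm : parts.mapM PySem.Int.ofStr? with
    | none => rfl
    | some octets =>
      have hlen : octets.length = 4 := by
        have := pvLenMapM _ _ _ hm
        omega
      match octets, hlen with
      | [a, b, c, d], _ =>
        simpa using pvCore a b c d
  · simp [hl]

-- ===== VERDICT (by name: the statement is the Claim_ definition above) =====
theorem is_valid_public_ipv4_spec : Claim_equal_is_valid_public_ipv4 := by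
  intro ip _
  exact (pv_main ip).symm ▸ rfl
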